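-- pv_equiv track=rewrite | github.com/DHRUVSHARM/Python_problems | ebay_2.py | foo
-- ===== SOURCE A (Python) =====
-- import heapq
--
-- def foo(wins, draws, scored, conceded):
--     points, h = [], []
--     for index in range(0, len(wins)):
--         point = 3 * wins[index] + draws[index]
--         gd = scored[index] - conceded[index]
--         h.append((-1 * point, -1 * gd, index))
--
--     heapq.heapify(h)
--     first = heapq.heappop(h)
--     second = heapq.heappop(h)
--
--     return [first[2], second[2]]
-- ===== SOURCE B (Python) =====
-- def foo(wins, draws, scored, conceded):
--     best, second = None, None
--     for index in range(0, len(wins)):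
--         point = 3 * wins[index] + draws[index]
--         gd = scored[index] - conceded[index]
--         key = (-point, -gd, index)
--         if best is None or key < best:
--             best, second = key, best
--         elif second is None or key < second:
--             second = key
--     return [best[2], second[2]]
-- ===== Notes on version B (the rewrite author's own statement) =====
-- stated objective: alternative
-- what changed: Replaces building a list, heapifying it and popping twice with a single linear pass that maintains the best and second-best key tuples; same composite key so tie-breaking is identical.
import Mathlib
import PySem

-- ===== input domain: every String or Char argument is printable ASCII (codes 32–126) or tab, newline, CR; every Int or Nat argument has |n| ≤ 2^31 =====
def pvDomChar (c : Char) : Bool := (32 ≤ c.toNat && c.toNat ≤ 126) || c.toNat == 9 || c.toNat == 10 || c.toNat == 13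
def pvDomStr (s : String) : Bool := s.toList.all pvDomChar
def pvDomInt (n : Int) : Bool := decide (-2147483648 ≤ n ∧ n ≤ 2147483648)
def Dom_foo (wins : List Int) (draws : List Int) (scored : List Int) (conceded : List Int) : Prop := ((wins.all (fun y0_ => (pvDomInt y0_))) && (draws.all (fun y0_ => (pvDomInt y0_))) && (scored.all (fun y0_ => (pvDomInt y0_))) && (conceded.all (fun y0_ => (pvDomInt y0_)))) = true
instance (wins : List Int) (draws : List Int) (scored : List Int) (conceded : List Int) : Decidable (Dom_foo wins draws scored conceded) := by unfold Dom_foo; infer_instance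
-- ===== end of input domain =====

-- B replaces heapify-then-two-heappops by one linear pass keeping the best and
-- second-best key tuples; same key (-point, -gd, index), so identical tie-breaking.

-- Python's `<` on the (Int, Int, Int) key tuples (lexicographic); used by both ports.
def pvLt (a b : Int × Int × Int) : Bool :=
  decide (a.1 < b.1 ∨ (a.1 = b.1 ∧ (a.2.1 < b.2.1 ∨ (a.2.1 = b.2.1 ∧ a.2.2 < b.2.2))))

-- ===== PORT A =====
-- heapq.heapify + heappop is ported by its contract: heappop removes and returns the
-- smallest element (first-minimal under pvLt, then List.erase); empty pop (an
-- IndexError in Python) returns [] here and is excluded by Pre_foo.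
def foo (wins : List Int) (draws : List Int) (scored : List Int) (conceded : List Int) : List Int :=
  let h := (PySem.List.pyRange 0 (wins.length : Int) 1).foldl
    (fun h index =>
      let point := 3 * PySem.List.pyGetD wins index 0 + PySem.List.pyGetD draws index 0
      let gd := PySem.List.pyGetD scored index 0 - PySem.List.pyGetD conceded index 0
      h ++ [(-1 * point, -1 * gd, index)]) []
  match h with
  | [] => []
  | x :: xs =>
    let first := xs.foldl (fun m y => if pvLt y m then y else m) x
    match h.erase first with
    | [] => []
    | y :: ys =>
      let second := ys.foldl (fun m y => if pvLt y m then y else m) y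
      [first.2.2, second.2.2]

-- ===== PORT B =====
-- one step of B's loop: update (best, second) with the next key
def fooStep (s : Option (Int × Int × Int) × Option (Int × Int × Int)) (k : Int × Int × Int) :
    Option (Int × Int × Int) × Option (Int × Int × Int) :=
  match s with
  | (none, sec) => (some k, sec)
  | (some b, sec) =>
    if pvLt k b then (some k, some b)
    else
      match sec with
      | none => (some b, some k)
      | some sv => if pvLt k sv then (some b, some k) else (some b, some sv)

def foo_alt (wins : List Int) (draws : List Int) (scored : List Int) (conceded : List Int) : List Int :=
  let st := (PySem.List.pyRange 0 (wins.length : Int) 1).foldl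
    (fun s index =>
      let point := 3 * PySem.List.pyGetD wins index 0 + PySem.List.pyGetD draws index 0
      let gd := PySem.List.pyGetD scored index 0 - PySem.List.pyGetD conceded index 0
      fooStep s (-point, -gd, index)) (none, none)
  match st with
  | (some b, some s) => [b.2.2, s.2.2]
  | _ => []   -- best/second still None: Python B raises TypeError, excluded by Pre_foo

-- ===== PRECONDITION & SPEC =====
-- Pre_: exactly the inputs on which A returns (at least two teams, so both heappops
-- succeed, and the other three lists long enough for every wins-index).
def Pre_foo (wins : List Int) (draws : List Int) (scored : List Int) (conceded : List Int) : Prop :=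
  2 ≤ wins.length ∧ wins.length ≤ draws.length ∧ wins.length ≤ scored.length ∧ wins.length ≤ conceded.length
instance (wins : List Int) (draws : List Int) (scored : List Int) (conceded : List Int) : Decidable (Pre_foo wins draws scored conceded) := by unfold Pre_foo; infer_instance

def pvWitness_foo : List Int × List Int × List Int × List Int :=
  ([2, 1, 0], [0, 1, 2], [5, 4, 3], [1, 2, 3])

def Spec_foo (wins : List Int) (draws : List Int) (scored : List Int) (conceded : List Int) (out : List Int) : Prop := out = foo_alt wins draws scored conceded
instance (wins : List Int) (draws : List Int) (scored : List Int) (conceded : List Int) (out : List Int) : Decidable (Spec_foo wins draws scored conceded out) := by unfold Spec_foo; infer_instance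

-- ===== CLAIM (what is proved, stated in full; the proofs are below) =====
def Claim_equal_foo : Prop := ∀ (wins : List Int) (draws : List Int) (scored : List Int) (conceded : List Int), Dom_foo wins draws scored conceded → Pre_foo wins draws scored conceded → Spec_foo wins draws scored conceded (foo wins draws scored conceded)

-- ===== LEMMAS AND PROOFS =====

-- running minimum (first-minimal element), as both A-side pops compute it
def runMin (x : Int × Int × Int) (xs : List (Int × Int × Int)) : Int × Int × Int :=
  xs.foldl (fun m y => if pvLt y m then y else m) x

def min1 (l : List (Int × Int × Int)) : Option (Int × Int × Int) :=
  match l with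
  | [] => none
  | x :: xs => some (runMin x xs)

-- A's (first, second) as a value: the minimum, and the minimum after erasing it
def top2 (l : List (Int × Int × Int)) : Option (Int × Int × Int) × Option (Int × Int × Int) :=
  match min1 l with
  | none => (none, none)
  | some m => (some m, min1 (l.erase m))

theorem pvLt_irrefl (a : Int × Int × Int) : pvLt a a = false := by
  obtain ⟨a1, a2, a3⟩ := a
  simp [pvLt]

theorem pvLt_trans {a b c : Int × Int × Int} (h1 : pvLt a b = true) (h2 : pvLt b c = true) :
    pvLt a c = true := by
  obtain ⟨a1, a2, a3⟩ := a; obtain ⟨b1, b2, b3⟩ := b; obtain ⟨c1, c2, c3⟩ := c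
  simp only [pvLt, decide_eq_true_eq] at *
  omega

theorem pvLt_of_ge_of_lt {a x r : Int × Int × Int} (h1 : pvLt a x = false)
    (h2 : pvLt a r = true) : pvLt x r = true := by
  obtain ⟨a1, a2, a3⟩ := a; obtain ⟨x1, x2, x3⟩ := x; obtain ⟨r1, r2, r3⟩ := r
  simp only [pvLt, decide_eq_true_eq, decide_eq_false_iff_not] at *
  omega

theorem runMin_min (xs : List (Int × Int × Int)) : ∀ (x : Int × Int × Int),
    runMin x xs ∈ x :: xs ∧ ∀ y ∈ x :: xs, pvLt y (runMin x xs) = false := by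
  induction xs with
  | nil =>
    intro x
    simp [runMin, pvLt_irrefl]
  | cons a t ih =>
    intro x
    have hstep : runMin x (a :: t) = runMin (if pvLt a x then a else x) t := rfl
    obtain ⟨hmem, hmin⟩ := ih (if pvLt a x then a else x)
    constructor
    · rw [hstep]
      rcases List.mem_cons.mp hmem with h | h
      · by_cases hax : pvLt a x = true
        · simp only [hax, if_true] at h ⊢; simp [h]
        · simp only [Bool.of_not_eq_true hax, Bool.false_eq_true, if_false] at h ⊢; simp [h]
      · simp [h]
    · intro y hy
      rw [hstep]
      set r := runMin (if pvLt a x then a else x) t with hr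
      have hhead : pvLt (if pvLt a x then a else x) r = false := hmin _ (by simp)
      rcases List.mem_cons.mp hy with hyx | hy'
      · subst hyx
        by_cases hax : pvLt a y = true
        · -- head replaced by a; if y < r then a < r by trans, contradiction
          simp [hax] at hhead
          by_contra hc
          simp only [Bool.not_eq_false] at hc
          have := pvLt_trans hax hc
          simp [this] at hhead
        · simp [Bool.of_not_eq_true hax] at hhead
          exact hhead
      · rcases List.mem_cons.mp hy' with hya | hyt
        · subst hya
          by_cases hax : pvLt y x = true
          · simp [hax] at hhead; exact hhead
          · -- y ≥ x kept as head: y < r would give x < r, contradicting ¬ x < r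
            simp [Bool.of_not_eq_true hax] at hhead
            by_contra hc
            simp only [Bool.not_eq_false] at hc
            have hax' : pvLt y x = false := Bool.of_not_eq_true hax
            have := pvLt_of_ge_of_lt hax' hc
            simp [this] at hhead
        · exact hmin y (by simp [hyt])

theorem min1_mem {l : List (Int × Int × Int)} {m : Int × Int × Int}
    (h : min1 l = some m) : m ∈ l := by
  cases l with
  | nil => simp [min1] at h
  | cons x xs =>
    simp only [min1, Option.some.injEq] at h
    subst h
    exact (runMin_min xs x).1

theorem min1_isMin {l : List (Int × Int × Int)} {m : Int × Int × Int}
    (h : min1 l = some m) : ∀ y ∈ l, pvLt y m = false := by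
  cases l with
  | nil => simp [min1] at h
  | cons x xs =>
    simp only [min1, Option.some.injEq] at h
    subst h
    exact (runMin_min xs x).2

theorem min1_append_singleton {l : List (Int × Int × Int)} {m x : Int × Int × Int}
    (h : min1 l = some m) : min1 (l ++ [x]) = some (if pvLt x m then x else m) := by
  cases l with
  | nil => simp [min1] at h
  | cons q qs =>
    simp only [min1, Option.some.injEq] at h
    simp only [List.cons_append, min1, Option.some.injEq, runMin, List.foldl_append]
    rw [show qs.foldl (fun m y => if pvLt y m then y else m) q = runMin q qs from rfl, h]
    simp [List.foldl]

-- crux: B's step applied to A's answer on prefix p is A's answer on p ++ [x]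
theorem fooStep_top2 (p : List (Int × Int × Int)) (x : Int × Int × Int) :
    fooStep (top2 p) x = top2 (p ++ [x]) := by
  cases hp : min1 p with
  | none =>
    have hpnil : p = [] := by cases p with
      | nil => rfl
      | cons a b => simp [min1] at hp
    subst hpnil
    simp [top2, min1, runMin, fooStep, List.erase_cons_head]
  | some m =>
    have hm : m ∈ p := min1_mem hp
    have happ := min1_append_singleton (x := x) hp
    by_cases hxm : pvLt x m = true
    · -- new element beats the minimum; it cannot occur in p
      have hxnot : x ∉ p := by
        intro hxp
        have := min1_isMin hp x hxp
        simp [hxm] at this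
      have herase : (p ++ [x]).erase x = p := by
        rw [List.erase_append_right _ hxnot]
        simp
      simp only [top2, hp, happ, hxm, if_true, herase]
      cases hsec : min1 (p.erase m) with
      | none => simp [fooStep, hxm]
      | some sv => simp [fooStep, hxm]
    · have hxm' : pvLt x m = false := Bool.of_not_eq_true hxm
      have herase : (p ++ [x]).erase m = p.erase m ++ [x] := List.erase_append_left _ hm
      simp only [top2, hp, happ, hxm', Bool.false_eq_true, if_false]
      cases hsec : min1 (p.erase m) with
      | none =>
        have hnil : p.erase m = [] := by
          cases h' : p.erase m with
          | nil => rfl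
          | cons a b => rw [h'] at hsec; simp [min1] at hsec
        simp only [fooStep, hxm', Bool.false_eq_true, if_false]
        rw [herase, hnil]
        simp [min1, runMin]
      | some sv =>
        have happ2 := min1_append_singleton (x := x) hsec
        simp only [fooStep, hxm', Bool.false_eq_true, if_false]
        by_cases hxs : pvLt x sv = true
        · rw [herase, happ2]; simp [hxs]
        · rw [herase, happ2]; simp [Bool.of_not_eq_true hxs]

theorem foldl_fooStep (l : List (Int × Int × Int)) : ∀ (p : List (Int × Int × Int)),
    l.foldl fooStep (top2 p) = top2 (p ++ l) := by
  induction l with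
  | nil => intro p; simp
  | cons x xs ih =>
    intro p
    have : (x :: xs).foldl fooStep (top2 p) = xs.foldl fooStep (fooStep (top2 p) x) := rfl
    rw [this, fooStep_top2, ih (p ++ [x])]
    simp

theorem foldl_fooStep_nil (l : List (Int × Int × Int)) :
    l.foldl fooStep (none, none) = top2 l := by
  have := foldl_fooStep l []
  simpa [top2, min1] using this

-- build of A's list h as a map over the index range
theorem build_eq_map (f : Int → Int × Int × Int) (l : List Int) :
    l.foldl (fun h i => h ++ [f i]) [] = l.map f := by
  simpa using PySem.List.foldl_append_singleton_eq_map f l []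

-- ===== VERDICT (by name: the statement is the Claim_ definition above) =====
theorem foo_spec : Claim_equal_foo := by
  intro wins draws scored conceded _ _
  unfold Spec_foo foo foo_alt
  set key : Int → Int × Int × Int := fun index =>
    (-(3 * PySem.List.pyGetD wins index 0 + PySem.List.pyGetD draws index 0),
     -(PySem.List.pyGetD scored index 0 - PySem.List.pyGetD conceded index 0), index) with hkey
  set idxs := PySem.List.pyRange 0 (wins.length : Int) 1 with hidxs
  have hA : idxs.foldl
      (fun h index =>
        let point := 3 * PySem.List.pyGetD wins index 0 + PySem.List.pyGetD draws index 0
        let gd := PySem.List.pyGetD scored index 0 - PySem.List.pyGetD conceded index 0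
        h ++ [(-1 * point, -1 * gd, index)]) [] = idxs.map key := by
    have := build_eq_map key idxs
    simpa [hkey, neg_one_mul] using this
  have hB : idxs.foldl
      (fun s index =>
        let point := 3 * PySem.List.pyGetD wins index 0 + PySem.List.pyGetD draws index 0
        let gd := PySem.List.pyGetD scored index 0 - PySem.List.pyGetD conceded index 0
        fooStep s (-point, -gd, index)) (none, none) = (idxs.map key).foldl fooStep (none, none) := by
    rw [List.foldl_map]
  rw [hA, hB, foldl_fooStep_nil]
  -- both sides now depend only on the key list l; they agree for every l
  set l := idxs.map key with hl
  clear_value l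
  cases l with
  | nil => simp [top2, min1]
  | cons x xs =>
    simp only [top2, min1, runMin]
    set first := xs.foldl (fun m y => if pvLt y m then y else m) x with hfirst
    cases herase : (x :: xs).erase first with
    | nil => simp
    | cons y ys => simp
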